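-- pv_equiv track=rewrite | github.com/danniesidequestmaxxing/unified-crypto-bot | src/core/message_utils.py | split_html_chunks
-- ===== SOURCE A (Python) =====
-- MAX_TG_MSG = 4096
--
-- def split_html_chunks(text: str, max_len: int = MAX_TG_MSG) -> list[str]:
--     """Split HTML text into <=max_len-char chunks without breaking <pre> tags."""
--     chunks: list[str] = []
--     while text:
--         if len(text) <= max_len:
--             chunks.append(text)
--             break
--         split_at = text.rfind("\n", 0, max_len)
--         if split_at == -1:
--             split_at = max_len
--
--         candidate = text[:split_at]
--         open_count = candidate.count("<pre>")
--         close_count = candidate.count("</pre>")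
--         if open_count > close_count:
--             candidate += "\n</pre>"
--             text = "<pre>" + text[split_at:].lstrip("\n")
--         else:
--             text = text[split_at:].lstrip("\n")
--
--         chunks.append(candidate)
--     return chunks
-- ===== SOURCE B (Python) =====
-- MAX_TG_MSG = 4096
--
-- def split_html_chunks(text: str, max_len: int = MAX_TG_MSG) -> list[str]:
--     """Split HTML text into <=max_len-char chunks without breaking <pre> tags.
--
--     Single pass over the original string with an index pointer and a
--     'reopened <pre>' flag instead of repeatedly re-slicing the text.
--     """
--     n = len(text)
--     chunks: list[str] = []
--     i = 0
--     pre = False  # logical remaining text is ("<pre>" if pre else "") + text[i:]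
--     while pre or i < n:
--         head = 5 if pre else 0
--         if head + (n - i) <= max_len:
--             chunks.append(("<pre>" if pre else "") + text[i:])
--             break
--         w_end = i + max_len - head
--         j = text.rfind("\n", i, w_end)
--         k = w_end if j == -1 else j
--         candidate = ("<pre>" if pre else "") + text[i:k]
--         opens = (1 if pre else 0) + text.count("<pre>", i, k)
--         closes = text.count("</pre>", i, k)
--         if opens > closes:
--             chunks.append(candidate + "\n</pre>")
--             pre = True
--         else:
--             chunks.append(candidate)
--             pre = False
--         i = k
--         while i < n and text[i] == "\n":
--             i += 1
--     return chunks
-- ===== Notes on version B (the rewrite author's own statement) =====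
-- stated objective: faster
-- what changed: A repeatedly re-slices the remaining text (an O(n) copy per chunk for the slices, lstrip and '<pre>'-reopening concatenations); B makes a single pass over the original string with an index pointer and a 'reopened <pre>' boolean flag, computing each chunk boundary with ranged rfind/count on the original string, so no shrinking copy of the text is ever built.
-- outside the precondition, e.g. on split_html_chunks('ab\n', -1): A returns ['ab'], B does not finish within the time limit
import Mathlib
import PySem

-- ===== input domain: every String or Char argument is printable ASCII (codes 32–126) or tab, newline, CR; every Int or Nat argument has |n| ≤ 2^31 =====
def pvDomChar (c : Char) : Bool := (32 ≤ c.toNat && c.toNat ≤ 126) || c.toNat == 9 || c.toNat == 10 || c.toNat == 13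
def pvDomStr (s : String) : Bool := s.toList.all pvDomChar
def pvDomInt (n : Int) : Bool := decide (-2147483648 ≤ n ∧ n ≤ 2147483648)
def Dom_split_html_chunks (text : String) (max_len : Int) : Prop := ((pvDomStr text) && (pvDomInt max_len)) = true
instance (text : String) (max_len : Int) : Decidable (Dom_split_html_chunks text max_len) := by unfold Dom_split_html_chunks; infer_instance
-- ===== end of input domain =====

-- B replaces A's re-slicing of the shrinking text (and recounting over fresh slices) by a single
-- index pointer into the original string plus a 'reopened <pre>' flag (objective: faster, one pass).

-- ===== PORT A =====
def pvPre5 : List Char := ['<', 'p', 'r', 'e', '>']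

def pvNlClose : List Char := ['\n', '<', '/', 'p', 'r', 'e', '>']

def pvCountTok (c : Char) (cs : List Char) : List Char → Nat
  | [] => 0
  | x :: xs =>
    if (c :: cs).isPrefixOf (x :: xs) then 1 + pvCountTok c cs (xs.drop cs.length)
    else pvCountTok c cs xs
termination_by l => l.length
decreasing_by all_goals simp [List.length_drop]

def pvLastNl : List Char → Option Nat
  | [] => none
  | x :: xs =>
    match pvLastNl xs with
    | some j => some (j + 1)
    | none => if x = '\n' then some 0 else none

def pvLoopA (max_len : Int) : Nat → List Char → List (List Char) → List (List Char)
  | 0, _, acc => acc.reverse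
  | fuel + 1, t, acc =>
    if t = [] then acc.reverse
    else if (t.length : Int) ≤ max_len then (t :: acc).reverse
    else
      let splitAt : Int :=
        match pvLastNl (PySem.List.slice t none (some max_len)) with
        | some j => (j : Int)
        | none => max_len
      let candidate := PySem.List.slice t none (some splitAt)
      if pvCountTok '<' ['/', 'p', 'r', 'e', '>'] candidate
           < pvCountTok '<' ['p', 'r', 'e', '>'] candidate then
        pvLoopA max_len fuel
          (pvPre5 ++ (PySem.List.slice t (some splitAt) none).dropWhile (fun c => c = '\n'))
          ((candidate ++ pvNlClose) :: acc)
      else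
        pvLoopA max_len fuel
          ((PySem.List.slice t (some splitAt) none).dropWhile (fun c => c = '\n'))
          (candidate :: acc)

def split_html_chunks (text : String) (max_len : Int) : List String :=
  (pvLoopA max_len (text.toList.length + 1) text.toList []).map (fun l => String.ofList l)

-- ===== PORT B =====
def pvSkipNl (t : List Char) (i : Nat) : Nat :=
  if h : i < t.length then
    if t[i] = '\n' then pvSkipNl t (i + 1) else i
  else i
termination_by t.length - i

def pvLoopB (t : List Char) (max_len : Int) : Nat → Nat → Bool → List (List Char) → List (List Char)
  | 0, _, _, acc => acc.reverse
  | fuel + 1, i, pre, acc =>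
    if pre = false ∧ t.length ≤ i then acc.reverse
    else
      let head : Nat := if pre then 5 else 0
      if ((head + (t.length - i) : Nat) : Int) ≤ max_len then
        (((if pre then pvPre5 else []) ++ t.drop i) :: acc).reverse
      else
        let wlen : Nat := (max_len - head).toNat
        let k : Nat :=
          match pvLastNl ((t.drop i).take wlen) with
          | some j => i + j
          | none => i + wlen
        let slice := (t.drop i).take (k - i)
        let opens := (if pre then 1 else 0) + pvCountTok '<' ['p', 'r', 'e', '>'] slice
        let closes := pvCountTok '<' ['/', 'p', 'r', 'e', '>'] slice
        let i2 := pvSkipNl t k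
        if closes < opens then
          pvLoopB t max_len fuel i2 true (((if pre then pvPre5 else []) ++ slice ++ pvNlClose) :: acc)
        else
          pvLoopB t max_len fuel i2 false (((if pre then pvPre5 else []) ++ slice) :: acc)

def split_html_chunks_alt (text : String) (max_len : Int) : List String :=
  (pvLoopB text.toList max_len (text.toList.length + 1) 0 false []).map (fun l => String.ofList l)

-- ===== PRECONDITION & SPEC =====
-- Pre_ excludes max_len ≤ 0 on nonempty text: there A never makes progress towards len(text) <= max_len
-- and loops forever on almost every input, returning only on a few degenerate texts via Python's
-- negative-end slice wraparound (see the cite), where B's index loop does not terminate.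
def Pre_split_html_chunks (text : String) (max_len : Int) : Prop :=
  text = "" ∨ 1 ≤ max_len
instance (text : String) (max_len : Int) : Decidable (Pre_split_html_chunks text max_len) := by
  unfold Pre_split_html_chunks; infer_instance

def pvWitness_split_html_chunks : String × Int := ("ab\ncd", 3)

def Spec_split_html_chunks (text : String) (max_len : Int) (out : List String) : Prop :=
  out = split_html_chunks_alt text max_len
instance (text : String) (max_len : Int) (out : List String) : Decidable (Spec_split_html_chunks text max_len out) := by
  unfold Spec_split_html_chunks; infer_instance

-- ===== CLAIM (what is proved, stated in full; the proofs are below) =====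
def Claim_equal_split_html_chunks : Prop := ∀ (text : String) (max_len : Int), Dom_split_html_chunks text max_len → Pre_split_html_chunks text max_len → Spec_split_html_chunks text max_len (split_html_chunks text max_len)

-- ===== LEMMAS AND PROOFS =====

lemma pvCountTok_cons (c : Char) (cs : List Char) (x : Char) (xs : List Char) :
    pvCountTok c cs (x :: xs) =
      if (c :: cs).isPrefixOf (x :: xs) then 1 + pvCountTok c cs (xs.drop cs.length)
      else pvCountTok c cs xs := by
  simp [pvCountTok]

lemma pvCountTok_pos_len (c : Char) (cs : List Char) : ∀ (u : List Char),
    0 < pvCountTok c cs u → cs.length + 1 ≤ u.length := by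
  intro u
  induction hn : u.length using Nat.strong_induction_on generalizing u with
  | _ n ih =>
    cases u with
    | nil => intro h; simp [pvCountTok] at h
    | cons x xs =>
      intro h
      subst hn
      rw [pvCountTok_cons] at h
      split_ifs at h with hp
      · have := (List.isPrefixOf_iff_prefix.mp hp).length_le
        simp at this ⊢
        omega
      · have := ih xs.length (by simp) xs rfl h
        simp; omega

lemma pvSkipNl_dropWhile (t : List Char) : ∀ (k : Nat),
    (t.drop k).dropWhile (fun c => c = '\n') = t.drop (pvSkipNl t k) := by
  intro k
  induction hn : t.length - k using Nat.strong_induction_on generalizing k with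
  | _ n ih =>
    rw [pvSkipNl]
    split_ifs with h1 h2
    · rw [List.drop_eq_getElem_cons h1, List.dropWhile_cons]
      simp only [h2, decide_true, if_true]
      subst hn
      exact ih (t.length - (k+1)) (by omega) (k+1) rfl
    · rw [List.drop_eq_getElem_cons h1, List.dropWhile_cons]
      simp [h2]
    · rw [List.drop_eq_nil_iff.mpr (by omega)]
      simp

lemma pvLastNl_lt : ∀ {u : List Char} {j : Nat}, pvLastNl u = some j → j < u.length := by
  intro u
  induction u with
  | nil => intro j h; simp [pvLastNl] at h
  | cons x xs ih =>
    intro j h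
    rw [pvLastNl] at h
    cases hx : pvLastNl xs with
    | some j' =>
      rw [hx] at h
      simp only [Option.some.injEq] at h
      have := ih hx
      simp only [List.length_cons]
      omega
    | none =>
      rw [hx] at h
      split_ifs at h with hc
      simp only [Option.some.injEq] at h
      simp only [List.length_cons]
      omega

lemma pvLastNl_pre5 (u : List Char) :
    pvLastNl (pvPre5 ++ u) = (pvLastNl u).map (· + 5) := by
  simp only [pvPre5, List.cons_append, List.nil_append, pvLastNl]
  cases pvLastNl u <;> simp

lemma pvCountTok_open_pre5 (u : List Char) :
    pvCountTok '<' ['p', 'r', 'e', '>'] (pvPre5 ++ u)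
      = 1 + pvCountTok '<' ['p', 'r', 'e', '>'] u := by
  simp [pvPre5, pvCountTok_cons, List.isPrefixOf]

lemma pvCountTok_close_pre5 (u : List Char) :
    pvCountTok '<' ['/', 'p', 'r', 'e', '>'] (pvPre5 ++ u)
      = pvCountTok '<' ['/', 'p', 'r', 'e', '>'] u := by
  simp [pvPre5, pvCountTok_cons, List.isPrefixOf]

lemma pvTake_pre5 (s : List Char) (m : Nat) (h5 : 5 ≤ m) :
    (pvPre5 ++ s).take m = pvPre5 ++ s.take (m - 5) := by
  conv_lhs => rw [show m = pvPre5.length + (m - 5) from by simp [pvPre5]; omega]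
  rw [List.take_length_add_append]

lemma pvDrop_pre5 (s : List Char) (m : Nat) (h5 : 5 ≤ m) :
    (pvPre5 ++ s).drop m = s.drop (m - 5) := by
  conv_lhs => rw [show m = pvPre5.length + (m - 5) from by simp [pvPre5]; omega]
  rw [List.drop_length_add_append]

lemma pvLockstep (t : List Char) (max_len : Int) (hml : 1 ≤ max_len) :
    ∀ (fuel i : Nat) (pre : Bool) (acc : List (List Char)),
      (pre = true → 5 ≤ max_len) →
      pvLoopA max_len fuel ((if pre then pvPre5 else []) ++ t.drop i) acc
        = pvLoopB t max_len fuel i pre acc := by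
  obtain ⟨M, rfl⟩ : ∃ M : Nat, max_len = ((M : Nat) : Int) := ⟨max_len.toNat, by omega⟩
  intro fuel
  induction fuel with
  | zero => intro i pre acc _; rfl
  | succ f ih =>
    intro i pre acc hpre
    rw [pvLoopA, pvLoopB]
    simp only [PySem.List.slice_to_natCast]
    cases pre with
    | false =>
      simp only [Bool.false_eq_true, if_false, List.nil_append, List.length_drop,
        Nat.zero_add, Nat.cast_zero, Int.sub_zero, Int.toNat_natCast, true_and]
      by_cases h1 : t.length ≤ i
      · rw [if_pos (List.drop_eq_nil_iff.mpr h1), if_pos h1]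
      · rw [if_neg (fun hh => h1 (List.drop_eq_nil_iff.mp hh)), if_neg h1]
        by_cases h2 : (((t.length - i : Nat) : Int) ≤ ((M : Nat) : Int))
        · rw [if_pos h2, if_pos h2]
        · rw [if_neg h2, if_neg h2]
          cases hnl : pvLastNl ((t.drop i).take M) with
          | none =>
            simp only [PySem.List.slice_to_natCast, PySem.List.slice_from_natCast,
              Nat.add_sub_cancel_left]
            by_cases hc : pvCountTok '<' ['/', 'p', 'r', 'e', '>'] ((t.drop i).take M)
                < pvCountTok '<' ['p', 'r', 'e', '>'] ((t.drop i).take M)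
            · rw [if_pos hc, if_pos hc]
              have h5 : 5 ≤ ((M : Nat) : Int) := by
                have hpos : 0 < pvCountTok '<' ['p', 'r', 'e', '>'] ((t.drop i).take M) := by omega
                have := pvCountTok_pos_len _ _ _ hpos
                simp [List.length_take] at this
                omega
              rw [List.drop_drop, pvSkipNl_dropWhile]
              simpa using ih (pvSkipNl t (i + M)) true _ (fun _ => h5)
            · rw [if_neg hc, if_neg hc]
              rw [List.drop_drop, pvSkipNl_dropWhile]
              simpa using ih (pvSkipNl t (i + M)) false _ (by simp)
          | some j =>
            simp only [PySem.List.slice_to_natCast, PySem.List.slice_from_natCast,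
              Nat.add_sub_cancel_left]
            by_cases hc : pvCountTok '<' ['/', 'p', 'r', 'e', '>'] ((t.drop i).take j)
                < pvCountTok '<' ['p', 'r', 'e', '>'] ((t.drop i).take j)
            · rw [if_pos hc, if_pos hc]
              have h5 : 5 ≤ ((M : Nat) : Int) := by
                have hpos : 0 < pvCountTok '<' ['p', 'r', 'e', '>'] ((t.drop i).take j) := by omega
                have := pvCountTok_pos_len _ _ _ hpos
                have hj := pvLastNl_lt hnl
                simp [List.length_take] at this hj
                omega
              rw [List.drop_drop, pvSkipNl_dropWhile]
              simpa using ih (pvSkipNl t (i + j)) true _ (fun _ => h5)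
            · rw [if_neg hc, if_neg hc]
              rw [List.drop_drop, pvSkipNl_dropWhile]
              simpa using ih (pvSkipNl t (i + j)) false _ (by simp)
    | true =>
      have h5 : 5 ≤ ((M : Nat) : Int) := hpre rfl
      have hM5 : 5 ≤ M := by exact_mod_cast h5
      simp only [if_true, List.length_append, List.length_drop, Bool.true_eq_false,
        false_and, if_false]
      rw [if_neg (show ¬(pvPre5 ++ t.drop i = []) from by simp [pvPre5])]
      have hl5 : pvPre5.length = 5 := by simp [pvPre5]
      rw [hl5]
      have hw5 : (((M : Nat) : Int) - ((5 : Nat) : Int)).toNat = M - 5 := by omega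
      by_cases h2 : (((5 + (t.length - i) : Nat) : Int) ≤ ((M : Nat) : Int))
      · rw [if_pos h2, if_pos h2]
      · rw [if_neg h2, if_neg h2]
        rw [pvTake_pre5 _ M hM5, pvLastNl_pre5, hw5]
        cases hnl : pvLastNl ((t.drop i).take (M - 5)) with
        | none =>
          simp only [Option.map_none, PySem.List.slice_to_natCast,
            PySem.List.slice_from_natCast, Nat.add_sub_cancel_left,
            pvTake_pre5 _ M hM5, pvDrop_pre5 _ M hM5,
            pvCountTok_open_pre5, pvCountTok_close_pre5]
          by_cases hc : pvCountTok '<' ['/', 'p', 'r', 'e', '>'] ((t.drop i).take (M - 5))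
              < 1 + pvCountTok '<' ['p', 'r', 'e', '>'] ((t.drop i).take (M - 5))
          · rw [if_pos hc, if_pos (by simpa using hc)]
            rw [List.drop_drop, pvSkipNl_dropWhile]
            have := ih (pvSkipNl t (i + (M - 5))) true
              ((pvPre5 ++ (t.drop i).take (M - 5) ++ pvNlClose) :: acc) (fun _ => h5)
            simpa [List.append_assoc] using this
          · rw [if_neg hc, if_neg (by simpa using hc)]
            rw [List.drop_drop, pvSkipNl_dropWhile]
            simpa using ih (pvSkipNl t (i + (M - 5))) false _ (by simp)
        | some j =>
          simp only [Option.map_some, PySem.List.slice_to_natCast,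
            PySem.List.slice_from_natCast, Nat.add_sub_cancel_left,
            pvTake_pre5 _ (j + 5) (by omega), pvDrop_pre5 _ (j + 5) (by omega),
            Nat.add_sub_cancel, pvCountTok_open_pre5, pvCountTok_close_pre5]
          by_cases hc : pvCountTok '<' ['/', 'p', 'r', 'e', '>'] ((t.drop i).take j)
              < 1 + pvCountTok '<' ['p', 'r', 'e', '>'] ((t.drop i).take j)
          · rw [if_pos hc, if_pos (by simpa using hc)]
            rw [List.drop_drop, pvSkipNl_dropWhile]
            have := ih (pvSkipNl t (i + j)) true
              ((pvPre5 ++ (t.drop i).take j ++ pvNlClose) :: acc) (fun _ => h5)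
            simpa [List.append_assoc] using this
          · rw [if_neg hc, if_neg (by simpa using hc)]
            rw [List.drop_drop, pvSkipNl_dropWhile]
            simpa using ih (pvSkipNl t (i + j)) false _ (by simp)

-- ===== VERDICT (by name: the statement is the Claim_ definition above) =====
theorem split_html_chunks_spec : Claim_equal_split_html_chunks := by
  intro text max_len _ hpre
  unfold Spec_split_html_chunks split_html_chunks split_html_chunks_alt
  rcases hpre with h0 | hml
  · subst h0; rfl
  · have h := pvLockstep text.toList max_len hml (text.toList.length + 1) 0 false [] (by simp)
    simp only [Bool.false_eq_true, if_false, List.drop_zero, List.nil_append] at h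
    rw [h]
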